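-- pv_equiv track=rewrite | github.com/wIlliam23o/wp_site | searcher/searchtools.py | search_targets
-- ===== SOURCE A (Python) =====
-- def search_targets(queries, targets):
--     """ Search all target strings in [targets] for all queries in [queries].
--         Returns True on first match, False on no match.
--         (no regex used, just 'if s.lower() in t.lower()')
--     """
--
--     if not queries:
--         return False
--
--     for target in targets:
--         if target:
--             target = target.lower()
--             for query in queries:
--                 if query in target:
--                     # Return True on first match
--                     return True
--     return False
-- ===== SOURCE B (Python) =====
-- def search_targets(queries, targets):
--     """Position-driven multi-pattern scan: walk each lowered target once, left to
--     right, and at every start offset test all queries at once with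
--     str.startswith(q, i) -- no use of the substring operator 'in'."""
--     for target in targets:
--         t = target.lower()
--         for i in range(len(t)):
--             for q in queries:
--                 if t.startswith(q, i):
--                     return True
--     return False
-- ===== Notes on version B (the rewrite author's own statement) =====
-- stated objective: alternative
-- what changed: B replaces A's per-pair use of the substring operator ('query in target') with a position-driven multi-pattern scan: each lowered target is walked once left to right and at every offset all queries are tested simultaneously with str.startswith(q, i), so the substring search itself is done explicitly rather than by Python's 'in'.
import Mathlib
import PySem

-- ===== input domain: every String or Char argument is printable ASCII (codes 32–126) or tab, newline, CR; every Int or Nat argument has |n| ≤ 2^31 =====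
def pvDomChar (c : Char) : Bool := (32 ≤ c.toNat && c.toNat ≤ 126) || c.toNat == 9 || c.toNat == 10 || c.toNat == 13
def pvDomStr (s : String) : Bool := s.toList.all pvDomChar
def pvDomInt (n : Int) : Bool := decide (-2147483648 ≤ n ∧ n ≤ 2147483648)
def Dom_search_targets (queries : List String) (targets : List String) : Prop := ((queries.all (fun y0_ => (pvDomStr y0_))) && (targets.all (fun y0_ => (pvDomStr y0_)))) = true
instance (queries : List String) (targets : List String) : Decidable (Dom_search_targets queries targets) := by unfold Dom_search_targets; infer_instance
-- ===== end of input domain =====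

-- B replaces the per-pair substring operator with a position-driven multi-pattern scan
-- (one left-to-right pass per lowered target, testing every query as a prefix at each
-- offset); same result, alternative mechanism.

-- ===== PORT A =====
-- inner 'for query in queries: if query in target: return True'
def searchA_inner (target : String) : List String → Bool
  | [] => false
  | q :: rest => if PySem.Str.isIn q target then true else searchA_inner target rest

-- outer 'for target in targets: if target: …'
def searchA_go (queries : List String) : List String → Bool
  | [] => false
  | t :: rest =>
      if t ≠ "" then
        let tl := PySem.Str.lower t
        if searchA_inner tl queries then true else searchA_go queries rest
      else searchA_go queries rest

def search_targets (queries : List String) (targets : List String) : Bool :=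
  if queries = [] then false
  else searchA_go queries targets

-- ===== PORT B =====
-- 'for i in range(len(t)): for q in queries: if t.startswith(q, i): return True'
-- t.startswith(q, i) with 0 ≤ i < len(t) is exactly: q is a prefix of t dropped by i;
-- the recursion walks the suffixes of t, i.e. the offsets i = 0, 1, …, len(t)-1.
def scanB (queries : List (List Char)) : List Char → Bool
  | [] => false
  | c :: rest =>
      if queries.any (fun q => PySem.Chars.startswith (c :: rest) q) then true
      else scanB queries rest

def search_targets_alt (queries : List String) (targets : List String) : Bool :=
  targets.any (fun t => scanB (queries.map String.toList) (PySem.Chars.lower t.toList))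

-- ===== PRECONDITION & SPEC =====
def Spec_search_targets (queries : List String) (targets : List String) (out : Bool) : Prop := out = search_targets_alt queries targets
instance (queries : List String) (targets : List String) (out : Bool) : Decidable (Spec_search_targets queries targets out) := by unfold Spec_search_targets; infer_instance

-- ===== CLAIM =====
def Claim_equal_search_targets : Prop := ∀ (queries : List String) (targets : List String), Dom_search_targets queries targets → Spec_search_targets queries targets (search_targets queries targets)

-- ===== LEMMAS AND PROOFS =====

lemma searchA_inner_eq_any (target : String) (qs : List String) :
    searchA_inner target qs = qs.any (fun q => PySem.Str.isIn q target) := by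
  induction qs with
  | nil => rfl
  | cons q rest ih =>
      simp only [searchA_inner, List.any_cons, ih]
      cases h : PySem.Str.isIn q target <;> simp

lemma scanB_eq_true_iff (qs : List (List Char)) (s : List Char) :
    scanB qs s = true ↔ ∃ q ∈ qs, ∃ j < s.length, q <+: s.drop j := by
  induction s with
  | nil => simp [scanB]
  | cons c rest ih =>
      simp only [scanB]
      by_cases h : (qs.any (fun q => PySem.Chars.startswith (c :: rest) q)) = true
      · simp only [h, if_true, true_iff]
        rcases List.any_eq_true.mp h with ⟨q, hq, hsw⟩
        exact ⟨q, hq, 0, by simp, by simpa using (PySem.Chars.startswith_iff _ _).mp hsw⟩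
      · rw [if_neg h, ih]
        constructor
        · rintro ⟨q, hq, j, hj, hp⟩
          exact ⟨q, hq, j + 1, by simpa using hj, by simpa using hp⟩
        · rintro ⟨q, hq, j, hj, hp⟩
          cases j with
          | zero =>
              exfalso
              exact h (List.any_eq_true.mpr ⟨q, hq,
                (PySem.Chars.startswith_iff _ _).mpr (by simpa using hp)⟩)
          | succ k =>
              exact ⟨q, hq, k, by simpa using hj, by simpa using hp⟩

-- On a nonempty char list, the positional scan is exactly "some query is a substring".
lemma scanB_eq_any_isIn (qs : List (List Char)) (s : List Char) (hs : s ≠ []) :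
    scanB qs s = qs.any (fun q => PySem.Chars.isIn q s) := by
  rw [Bool.eq_iff_iff, scanB_eq_true_iff, List.any_eq_true]
  constructor
  · rintro ⟨q, hq, j, _, hp⟩
    exact ⟨q, hq, (PySem.Chars.exists_prefix_drop_iff_isIn q s).mp ⟨j, hp⟩⟩
  · rintro ⟨q, hq, hin⟩
    rcases (PySem.Chars.exists_prefix_drop_iff_isIn q s).mpr hin with ⟨j, hp⟩
    by_cases hj : j < s.length
    · exact ⟨q, hq, j, hj, hp⟩
    · have : s.drop j = [] := List.drop_eq_nil_of_le (by omega)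
      have hqnil : q = [] := List.prefix_nil.mp (this ▸ hp)
      exact ⟨q, hq, 0, by cases s <;> simp_all, by simp [hqnil]⟩

lemma lower_nil_iff (s : List Char) : PySem.Chars.lower s = [] ↔ s = [] := by
  cases s <;> simp [PySem.Chars.lower]

-- Per-target bridge: B's scan of the lowered target equals A's per-target test
-- (empty targets, which A skips, scan to false).
lemma scanB_target (qs : List String) (t : String) :
    scanB (qs.map String.toList) (PySem.Chars.lower t.toList)
      = (decide (t ≠ "") && qs.any (fun q => PySem.Str.isIn q (PySem.Str.lower t))) := by
  by_cases ht : t = ""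
  · subst ht; simp [PySem.Chars.lower, scanB]
  · have htl : t.toList ≠ [] := fun h => ht (String.toList_eq_nil_iff.mp h)
    have hlow : PySem.Chars.lower t.toList ≠ [] := fun h => htl ((lower_nil_iff _).mp h)
    rw [scanB_eq_any_isIn _ _ hlow]
    simp only [ht, ne_eq, not_false_eq_true, decide_true, Bool.true_and]
    rw [Bool.eq_iff_iff, List.any_eq_true, List.any_eq_true]
    constructor
    · rintro ⟨ql, hql, hin⟩
      rcases List.mem_map.mp hql with ⟨q, hq, rfl⟩
      refine ⟨q, hq, ?_⟩
      rw [PySem.Str.isIn_iff_infix, PySem.Str.toList_lower]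
      exact (PySem.Chars.isIn_iff_infix _ _).mp hin
    · rintro ⟨q, hq, hin⟩
      refine ⟨q.toList, List.mem_map_of_mem hq, ?_⟩
      rw [PySem.Chars.isIn_iff_infix]
      rw [PySem.Str.isIn_iff_infix, PySem.Str.toList_lower] at hin
      exact hin

lemma searchA_go_eq_any (qs : List String) (ts : List String) :
    searchA_go qs ts
      = ts.any (fun t => decide (t ≠ "") && qs.any (fun q => PySem.Str.isIn q (PySem.Str.lower t))) := by
  induction ts with
  | nil => rfl
  | cons t rest ih =>
      by_cases h : t = ""
      · simp [searchA_go, h, ih]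
      · simp only [searchA_go, h, ne_eq, not_false_eq_true, if_true,
          searchA_inner_eq_any, ih, List.any_cons, decide_true, Bool.true_and]
        cases hin : (qs.any fun q => PySem.Str.isIn q (PySem.Str.lower t)) <;> simp

lemma scanB_nil_queries (s : List Char) : scanB [] s = false := by
  induction s with
  | nil => rfl
  | cons c rest ih => simp [scanB, ih]

-- ===== VERDICT =====
theorem search_targets_spec : Claim_equal_search_targets := by
  intro queries targets _
  show search_targets queries targets = search_targets_alt queries targets
  unfold search_targets search_targets_alt
  rcases hq : queries with _ | ⟨q, qs⟩
  · simp [scanB_nil_queries]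
  · rw [if_neg (by simp), searchA_go_eq_any]
    simp only [scanB_target]
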